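-- pv_equiv track=rewrite | github.com/Mefodii/Kevolehc | GW2/guild/main.py | build_resource_line
-- ===== SOURCE A (Python) =====
-- def build_resource_line(ingredient, data):
--     values = []
--
--     cell_index = [64, 67]
--     for upgrade in data:
--         value = ""
--
--         if cell_index[-1] == 90:
--             cell_index[0] = cell_index[0] + 1
--             cell_index[-1] = 65
--         else:
--             cell_index[-1] = cell_index[-1] + 1
--
--         for upg_ing in upgrade.get("ingredients"):
--
--             if ingredient == upg_ing.get("name"):
--                 qty = upg_ing.get("qty")
--
--                 if cell_index[0] == 64:
--                     value = "=IF(" + chr(cell_index[1]) + "1=TRUE;" + qty + ";)"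
--                 else:
--                     value = "=IF(" + chr(cell_index[0]) + chr(cell_index[1]) + "1=TRUE;" + qty + ";)"
--
--         values.append(value)
--
--     return values
-- ===== SOURCE B (Python) =====
-- def build_resource_line(ingredient, data):
--     values = []
--     for j, upgrade in enumerate(data):
--         # closed-form column label: j=0..22 -> 'D'..'Z', then 'AA','AB',...
--         if j < 23:
--             label = chr(68 + j)
--         else:
--             m = j - 23
--             label = chr(65 + m // 26) + chr(65 + m % 26)
--         qty = None
--         for upg_ing in upgrade.get("ingredients"):
--             if upg_ing.get("name") == ingredient:
--                 qty = upg_ing.get("qty")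
--         values.append("" if qty is None else "=IF(" + label + "1=TRUE;" + qty + ";)")
--     return values
-- ===== Notes on version B (the rewrite author's own statement) =====
-- stated objective: simpler
-- what changed: Replaces the mutable two-cell odometer state with a direct closed-form column label computed from the enumeration index, and replaces repeated in-loop string formatting with a single last-match qty lookup formatted once per upgrade.
import Mathlib
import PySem

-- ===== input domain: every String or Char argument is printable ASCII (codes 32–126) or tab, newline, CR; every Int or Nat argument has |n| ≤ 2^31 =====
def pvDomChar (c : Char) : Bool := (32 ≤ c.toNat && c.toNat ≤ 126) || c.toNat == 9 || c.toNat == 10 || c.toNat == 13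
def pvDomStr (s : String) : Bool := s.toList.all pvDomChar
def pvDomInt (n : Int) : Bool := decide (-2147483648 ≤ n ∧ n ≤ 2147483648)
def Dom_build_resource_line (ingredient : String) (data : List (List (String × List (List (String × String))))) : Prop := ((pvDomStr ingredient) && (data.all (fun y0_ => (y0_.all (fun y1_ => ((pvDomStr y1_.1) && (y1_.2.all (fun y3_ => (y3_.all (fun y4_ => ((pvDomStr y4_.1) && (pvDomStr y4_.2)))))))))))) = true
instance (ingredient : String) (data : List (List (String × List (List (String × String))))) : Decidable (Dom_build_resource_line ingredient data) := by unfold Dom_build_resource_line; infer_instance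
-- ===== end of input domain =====

-- B replaces A's mutable two-cell odometer with a closed-form column label from the
-- enumeration index and keeps only the last matching qty, formatting once per upgrade
-- (objective: simpler). Return-value equivalence on Pre_ (A raises outside Pre_).

-- ===== PORT A =====
-- chr(n); exact for 0 ≤ n < 0x110000 (all values reached here)
def pvChr (n : Int) : String := String.ofList [Char.ofNat n.toNat]
-- upgrade.get(k) on the association-list dict (first match)
def pvGet {α : Type} (d : List (String × α)) (k : String) : Option α :=
  (PySem.Dict.mk d).get? k
-- body of A's outer loop; the '(get? … ).getD ""' default is only reached outside Pre_ (Python raises there)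
def pvStepA (ingredient : String) (st : List String × Int × Int)
    (upgrade : List (String × List (List (String × String)))) : List String × Int × Int :=
  let c0 : Int := if st.2.2 = 90 then st.2.1 + 1 else st.2.1
  let c1 : Int := if st.2.2 = 90 then 65 else st.2.2 + 1
  let value := ((pvGet upgrade "ingredients").getD []).foldl
    (fun value upg_ing =>
      if pvGet upg_ing "name" = some ingredient then
        let qty := (pvGet upg_ing "qty").getD ""
        if c0 = 64 then "=IF(" ++ pvChr c1 ++ "1=TRUE;" ++ qty ++ ";)"
        else "=IF(" ++ pvChr c0 ++ pvChr c1 ++ "1=TRUE;" ++ qty ++ ";)"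
      else value) ""
  (st.1 ++ [value], c0, c1)

def build_resource_line (ingredient : String) (data : List (List (String × List (List (String × String))))) : List String :=
  (data.foldl (pvStepA ingredient) ([], 64, 67)).1

-- ===== PORT B =====
def pvLabel (j : Nat) : String :=
  if (j : Int) < 23 then pvChr (68 + (j : Int))
  else pvChr (65 + PySem.Int.floordiv ((j : Int) - 23) 26)
       ++ pvChr (65 + PySem.Int.mod ((j : Int) - 23) 26)

def pvLastQty (ingredient : String) (ings : List (List (String × String))) : Option String :=
  ings.foldl (fun qty upg_ing =>
    if pvGet upg_ing "name" = some ingredient then pvGet upg_ing "qty" else qty) none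

def pvCellB (ingredient : String) (j : Nat)
    (upgrade : List (String × List (List (String × String)))) : String :=
  match pvLastQty ingredient ((pvGet upgrade "ingredients").getD []) with
  | none => ""
  | some q => "=IF(" ++ pvLabel j ++ "1=TRUE;" ++ q ++ ";)"

-- 'for j, upgrade in enumerate(data)'
def pvGoB (ingredient : String) :
    List (List (String × List (List (String × String)))) → Nat → List String
  | [], _ => []
  | u :: rest, j => pvCellB ingredient j u :: pvGoB ingredient rest (j + 1)

def build_resource_line_alt (ingredient : String) (data : List (List (String × List (List (String × String))))) : List String :=
  pvGoB ingredient data 0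

-- ===== PRECONDITION & SPEC =====
-- Exactly the inputs where Python A returns: every upgrade has an "ingredients" key,
-- and every ingredient entry whose name matches has a "qty" (else A's concatenation raises TypeError).
def Pre_build_resource_line (ingredient : String) (data : List (List (String × List (List (String × String))))) : Prop :=
  ∀ u ∈ data, (pvGet u "ingredients").isSome = true ∧
    ∀ i ∈ (pvGet u "ingredients").getD [],
      pvGet i "name" = some ingredient → (pvGet i "qty").isSome = true
instance (ingredient : String) (data : List (List (String × List (List (String × String))))) : Decidable (Pre_build_resource_line ingredient data) := by unfold Pre_build_resource_line; infer_instance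

def pvWitness_build_resource_line : String × (List (List (String × List (List (String × String))))) :=
  ("Iron", [[("ingredients", [[("name", "Iron"), ("qty", "5")]])], [("ingredients", [])]])

def Spec_build_resource_line (ingredient : String) (data : List (List (String × List (List (String × String))))) (out : List String) : Prop := out = build_resource_line_alt ingredient data
instance (ingredient : String) (data : List (List (String × List (List (String × String))))) (out : List String) : Decidable (Spec_build_resource_line ingredient data out) := by unfold Spec_build_resource_line; infer_instance

-- ===== CLAIM (what is proved, stated in full; the proofs are below) =====
def Claim_equal_build_resource_line : Prop := ∀ (ingredient : String) (data : List (List (String × List (List (String × String))))), Dom_build_resource_line ingredient data → Pre_build_resource_line ingredient data → Spec_build_resource_line ingredient data (build_resource_line ingredient data)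
-- ===== LEMMAS AND PROOFS =====

-- A's cell state after j iterations of the outer loop, in closed form
def pvC0 (j : Nat) : Int := if j ≤ 23 then 64 else 65 + ((j : Int) - 24) / 26
def pvC1 (j : Nat) : Int :=
  if j = 0 then 67 else if j ≤ 23 then 67 + (j : Int) else 65 + ((j : Int) - 24) % 26
def pvSt (j : Nat) : Int × Int := (pvC0 j, pvC1 j)

lemma pvC0_succ (j : Nat) :
    pvC0 (j + 1) = (if pvC1 j = 90 then pvC0 j + 1 else pvC0 j) := by
  simp only [pvC0, pvC1]
  split_ifs <;> push_cast <;> first | exact ‹False›.elim | omega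

lemma pvC1_succ (j : Nat) :
    pvC1 (j + 1) = (if pvC1 j = 90 then (65 : Int) else pvC1 j + 1) := by
  simp only [pvC1]
  split_ifs <;> push_cast <;> first | exact ‹False›.elim | omega

lemma label_eq (j : Nat) :
    (if pvC0 (j + 1) = 64 then pvChr (pvC1 (j + 1))
     else pvChr (pvC0 (j + 1)) ++ pvChr (pvC1 (j + 1))) = pvLabel j := by
  unfold pvLabel
  by_cases hj : (j : Int) < 23
  · have h0 : pvC0 (j + 1) = 64 := by simp only [pvC0]; split_ifs <;> push_cast <;> first | exact ‹False›.elim | omega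
    have h1 : pvC1 (j + 1) = 68 + (j : Int) := by
      simp only [pvC1]; split_ifs <;> push_cast <;> first | exact ‹False›.elim | omega
    simp [h0, h1, hj]
  · have h0 : pvC0 (j + 1) = 65 + ((j : Int) - 23) / 26 := by
      simp only [pvC0]; split_ifs <;> push_cast <;> first | exact ‹False›.elim | omega
    have h1 : pvC1 (j + 1) = 65 + ((j : Int) - 23) % 26 := by
      simp only [pvC1]; split_ifs <;> push_cast <;> first | exact ‹False›.elim | omega
    have hne : pvC0 (j + 1) ≠ 64 := by rw [h0]; omega
    rw [if_neg hne, if_neg hj, h0, h1,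
      PySem.Int.floordiv_eq_ediv_of_pos (by norm_num : (0:Int) < 26),
      PySem.Int.mod_eq_emod_of_pos (by norm_num : (0:Int) < 26)]

-- the inner loops agree (A re-formats at each match, B keeps the last qty),
-- given Pre_'s per-entry condition on the ingredient list
lemma inner_agree (ingredient : String) (c0 c1 : Int) (label : String)
    (hl : (if c0 = 64 then pvChr c1 else pvChr c0 ++ pvChr c1) = label) :
    ∀ (ings : List (List (String × String))) (o : Option String) (v : String),
      v = o.elim "" (fun q => "=IF(" ++ label ++ "1=TRUE;" ++ q ++ ";)") →
      (∀ i ∈ ings, pvGet i "name" = some ingredient → (pvGet i "qty").isSome = true) →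
      ings.foldl (fun value upg_ing =>
          if pvGet upg_ing "name" = some ingredient then
            let qty := (pvGet upg_ing "qty").getD ""
            if c0 = 64 then "=IF(" ++ pvChr c1 ++ "1=TRUE;" ++ qty ++ ";)"
            else "=IF(" ++ pvChr c0 ++ pvChr c1 ++ "1=TRUE;" ++ qty ++ ";)"
          else value) v
      = ((ings.foldl (fun qty upg_ing =>
            if pvGet upg_ing "name" = some ingredient then pvGet upg_ing "qty" else qty) o).elim
          "" (fun q => "=IF(" ++ label ++ "1=TRUE;" ++ q ++ ";)")) := by
  intro ings
  induction ings with
  | nil => intro o v hv _; simpa using hv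
  | cons i rest ih =>
    intro o v hv h
    simp only [List.foldl_cons]
    by_cases hm : pvGet i "name" = some ingredient
    · obtain ⟨q, hq⟩ := Option.isSome_iff_exists.mp (h i (List.mem_cons_self ..) hm)
      rw [if_pos hm, if_pos hm, hq]
      refine ih (some q) _ ?_ (fun i hi => h i (List.mem_cons_of_mem _ hi))
      rw [← hl]
      by_cases h64 : c0 = 64 <;> simp [h64, String.append_assoc]
    · rw [if_neg hm, if_neg hm]
      exact ih o v hv (fun i hi => h i (List.mem_cons_of_mem _ hi))

lemma step_agree (ingredient : String) (j : Nat) (vs : List String)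
    (u : List (String × List (List (String × String))))
    (hu : (pvGet u "ingredients").isSome = true ∧
      ∀ i ∈ (pvGet u "ingredients").getD [],
        pvGet i "name" = some ingredient → (pvGet i "qty").isSome = true) :
    pvStepA ingredient (vs, pvSt j) u = (vs ++ [pvCellB ingredient j u], pvSt (j + 1)) := by
  have hc0 : (if (vs, pvSt j).2.2 = 90 then (vs, pvSt j).2.1 + 1 else (vs, pvSt j).2.1)
      = pvC0 (j + 1) := (pvC0_succ j).symm
  have hc1 : (if (vs, pvSt j).2.2 = 90 then (65 : Int) else (vs, pvSt j).2.2 + 1)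
      = pvC1 (j + 1) := (pvC1_succ j).symm
  unfold pvStepA
  rw [hc0, hc1]
  have hin := inner_agree ingredient (pvC0 (j + 1)) (pvC1 (j + 1)) (pvLabel j) (label_eq j)
    ((pvGet u "ingredients").getD []) none "" rfl hu.2
  refine Prod.ext ?_ rfl
  show vs ++ [_] = vs ++ [pvCellB ingredient j u]
  rw [hin]
  unfold pvCellB pvLastQty
  cases ((pvGet u "ingredients").getD []).foldl (fun qty upg_ing =>
      if pvGet upg_ing "name" = some ingredient then pvGet upg_ing "qty" else qty) none <;> rfl

lemma outer_agree (ingredient : String) :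
    ∀ (data : List (List (String × List (List (String × String))))) (j : Nat) (vs : List String),
      (∀ u ∈ data, (pvGet u "ingredients").isSome = true ∧
        ∀ i ∈ (pvGet u "ingredients").getD [],
          pvGet i "name" = some ingredient → (pvGet i "qty").isSome = true) →
      (data.foldl (pvStepA ingredient) (vs, pvSt j)).1 = vs ++ pvGoB ingredient data j := by
  intro data
  induction data with
  | nil => intro j vs _; simp [pvGoB]
  | cons u rest ih =>
    intro j vs h
    simp only [List.foldl_cons, pvGoB]
    rw [step_agree ingredient j vs u (h u (List.mem_cons_self ..)),
      ih (j + 1) (vs ++ [pvCellB ingredient j u]) (fun u hu => h u (List.mem_cons_of_mem _ hu))]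
    simp

-- ===== VERDICT (by name: the statement is the Claim_ definition above) =====
theorem build_resource_line_spec : Claim_equal_build_resource_line := by
  intro ingredient data _ hpre
  unfold Spec_build_resource_line build_resource_line build_resource_line_alt
  have h0 : ((64 : Int), (67 : Int)) = pvSt 0 := by decide
  rw [h0]
  exact outer_agree ingredient data 0 [] hpre
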